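-- pv_equiv track=rewrite | github.com/ashleyhma/hb-challenges | least_non_represented.py | least_non_represented
-- ===== SOURCE A (Python) =====
-- def least_non_represented(a):
--     """ Write a function that prints the least integer that is not present in a given list and cannot be represented by the summation of the sub-elements of the list.
--
--     E.g. For a = [1,2,5,7] the least integer not represented by the list or a slice of the list is 4, and if a = [1,2,2,5,7] then the least non-representable integer is 18. """
--
--     pos_sums = []
--
--     for i in range(len(a)):
--         for j in range(i, len(a)):
--             if i != j:
--                 pos_sums.append(a[i]+a[j])
--
--
--     pos_sums.extend(a)
--     b = list(set(pos_sums))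
--     b.sort()
--
--     for i in range(1, b[-1]):
--         if i not in b:
--             return i
-- ===== SOURCE B (Python) =====
-- def least_non_represented(a):
--     """On-demand two-sum probe instead of building the full pairwise-sum table."""
--     cnt = {}
--     for x in a:
--         cnt[x] = cnt.get(x, 0) + 1
--     s = sorted(a)
--     m = s[-1] if len(s) == 1 else max(s[-1], s[-1] + s[-2])
--     for i in range(1, m):
--         if i in cnt:
--             continue
--         if any(i - x in cnt and (2 * x != i or cnt[x] >= 2) for x in cnt):
--             continue
--         return i
--     return None
-- ===== Notes on version B (the rewrite author's own statement) =====
-- stated objective: alternative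
-- what changed: Instead of materialising every pairwise sum into a table, deduplicating and sorting it and scanning candidates by list membership, B builds a value counter once, computes the scan bound from the two largest elements of sorted(a), and tests each candidate on demand with a two-sum probe over the distinct values (requiring count>=2 when the candidate is twice a value).
-- outside the precondition, e.g. on least_non_represented([]): A raises IndexError, B raises IndexError
import Mathlib
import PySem

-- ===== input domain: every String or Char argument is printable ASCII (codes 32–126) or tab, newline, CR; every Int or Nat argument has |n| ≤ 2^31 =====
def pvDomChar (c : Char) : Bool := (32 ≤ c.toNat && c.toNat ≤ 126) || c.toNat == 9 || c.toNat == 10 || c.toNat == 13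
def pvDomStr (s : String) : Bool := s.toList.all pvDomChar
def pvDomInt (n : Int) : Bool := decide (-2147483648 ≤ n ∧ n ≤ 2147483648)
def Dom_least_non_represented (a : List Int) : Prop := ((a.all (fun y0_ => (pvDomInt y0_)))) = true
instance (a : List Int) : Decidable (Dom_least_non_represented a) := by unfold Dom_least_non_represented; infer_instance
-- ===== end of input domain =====

-- B replaces A's full pairwise-sum table (build, dedup, sort, then scan) by a value counter plus an
-- on-demand two-sum probe per candidate, with the scan bound computed from the two largest elements.

-- ===== PORT A =====
-- the nested index loops filling pos_sums
def pairSumsA (a : List Int) : List Int :=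
  (PySem.List.pyRange 0 (PySem.List.len a) 1).foldl (fun acc i =>
    (PySem.List.pyRange i (PySem.List.len a) 1).foldl (fun acc j =>
      if i ≠ j then acc ++ [PySem.List.pyGetD a i 0 + PySem.List.pyGetD a j 0] else acc) acc) []

-- 'for i in range(1, last): if i not in b: return i' — the range iterated lazily, as in
-- Python 3; the fuel (stop - i).toNat is exactly the number of remaining iterations
def scanAGo (b : List Int) : Nat → Int → Option Int
  | 0, _ => none
  | n + 1, i => if ¬ (i ∈ b) then some i else scanAGo b n (i + 1)

def scanA (b : List Int) (stop i : Int) : Option Int :=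
  scanAGo b (stop - i).toNat i

def least_non_represented (a : List Int) : Option Int :=
  let pos_sums := pairSumsA a ++ a
  let b := PySem.List.sorted (PySem.Set.ofList pos_sums) (fun x => x) false
  match PySem.List.pyGet? b (-1) with   -- last element: IndexError on a = [] (excluded by Pre_)
  | none => none
  | some last => scanA b last 1

-- ===== PORT B =====
-- 'any(i - x in cnt and (2 * x != i or cnt[x] >= 2) for x in cnt)'
def probeB (cnt : PySem.Dict Int Int) (i : Int) : Bool :=
  cnt.keys.any (fun x =>
    cnt.contains (i - x) && (decide (¬ 2 * x = i) || decide ((2:Int) ≤ cnt.getD x 0)))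

-- 'for i in range(1, m): if i in cnt: continue; if any(...): continue; return i' — lazy range
def scanBGo (cnt : PySem.Dict Int Int) : Nat → Int → Option Int
  | 0, _ => none
  | n + 1, i =>
    if cnt.contains i then scanBGo cnt n (i + 1)
    else if probeB cnt i then scanBGo cnt n (i + 1)
    else some i

def scanB (cnt : PySem.Dict Int Int) (stop i : Int) : Option Int :=
  scanBGo cnt (stop - i).toNat i

def least_non_represented_alt (a : List Int) : Option Int :=
  let cnt := a.foldl (fun d x => d.insert x (d.getD x 0 + 1)) PySem.Dict.empty
  let s := PySem.List.sorted a (fun x => x) false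
  match PySem.List.pyGet? s (-1) with   -- last element: IndexError on a = [] (excluded by Pre_)
  | none => none
  | some top =>
    let m := if PySem.List.len s = 1 then top else max top (top + PySem.List.pyGetD s (-2) 0)
    scanB cnt m 1

-- ===== PRECONDITION & SPEC =====
-- Pre_ excludes only the empty list, on which A raises IndexError reading the last element of its (empty) table.
def Pre_least_non_represented (a : List Int) : Prop := a ≠ []
instance (a : List Int) : Decidable (Pre_least_non_represented a) := by unfold Pre_least_non_represented; infer_instance
def pvWitness_least_non_represented : List Int := ([1, 2, 5, 7])

def Spec_least_non_represented (a : List Int) (out : Option Int) : Prop := out = least_non_represented_alt a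
instance (a : List Int) (out : Option Int) : Decidable (Spec_least_non_represented a out) := by unfold Spec_least_non_represented; infer_instance

-- ===== CLAIM (what is proved, stated in full; the proofs are below) =====
def Claim_equal_least_non_represented : Prop := ∀ (a : List Int), Dom_least_non_represented a → Pre_least_non_represented a → Spec_least_non_represented a (least_non_represented a)

-- ===== LEMMAS AND PROOFS =====

-- `t` is a sum of two entries of `l` at distinct positions
def Rep2 (l : List Int) (t : Int) : Prop := ∃ u v : Int, [u, v].Sublist l ∧ u + v = t

theorem pair_sublist_of_indices (l : List Int) (p q : Nat) (hpq : p < q) (hq : q < l.length) :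
    [l.getD p 0, l.getD q 0].Sublist l := by
  have hp : p < l.length := lt_trans hpq hq
  have hdrop : l.drop p = l[p] :: l.drop (p + 1) := List.drop_eq_getElem_cons hp
  have hv : l.getD q 0 ∈ l.drop (p + 1) := by
    have hq' : q - (p + 1) < (l.drop (p + 1)).length := by
      simp [List.length_drop]; omega
    refine List.mem_iff_getElem.mpr ⟨q - (p + 1), hq', ?_⟩
    rw [List.getElem_drop, List.getD_eq_getElem _ _ hq]
    congr 1; omega
  have h1 : [l.getD p 0, l.getD q 0].Sublist (l.drop p) := by
    rw [hdrop, List.getD_eq_getElem _ _ hp]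
    exact (List.singleton_sublist.mpr hv).cons₂ _
  exact h1.trans (List.drop_sublist p l)

theorem indices_of_pair_sublist {l : List Int} {u v : Int} (h : [u, v].Sublist l) :
    ∃ p q : Nat, p < q ∧ q < l.length ∧ l.getD p 0 = u ∧ l.getD q 0 = v := by
  induction l with
  | nil => simp at h
  | cons hd tl ih =>
    cases h with
    | cons _ h =>
      obtain ⟨p, q, h1, h2, h3, h4⟩ := ih h
      refine ⟨p + 1, q + 1, by omega, by simp only [List.length_cons]; omega, ?_, ?_⟩
      · rw [List.getD_eq_getElem _ _ (by simp only [List.length_cons]; omega : p + 1 < (hd :: tl).length),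
          List.getElem_cons_succ, ← List.getD_eq_getElem _ _ (by omega : p < tl.length)]
        exact h3
      · rw [List.getD_eq_getElem _ _ (by simp only [List.length_cons]; omega : q + 1 < (hd :: tl).length),
          List.getElem_cons_succ, ← List.getD_eq_getElem _ _ (by omega : q < tl.length)]
        exact h4
    | cons₂ _ h =>
      have hv : v ∈ tl := List.singleton_sublist.mp h
      obtain ⟨k, hk, hkv⟩ := List.mem_iff_getElem.mp hv
      refine ⟨0, k + 1, by omega, by simp only [List.length_cons]; omega, by simp, ?_⟩
      rw [List.getD_eq_getElem _ _ (by simp only [List.length_cons]; omega : k + 1 < _),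
        List.getElem_cons_succ]
      exact hkv

theorem pair_sublist_or_swap {l : List Int} {u v : Int} (hu : u ∈ l) (hv : v ∈ l) (hne : u ≠ v) :
    [u, v].Sublist l ∨ [v, u].Sublist l := by
  induction l with
  | nil => simp at hu
  | cons hd tl ih =>
    by_cases hu' : u = hd
    · subst hu'
      have hv' : v ∈ tl := by
        rcases List.mem_cons.mp hv with h | h
        · exact absurd h (Ne.symm hne)
        · exact h
      exact Or.inl ((List.singleton_sublist.mpr hv').cons₂ _)
    · by_cases hv' : v = hd
      · subst hv'
        have hu'' : u ∈ tl := by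
          rcases List.mem_cons.mp hu with h | h
          · exact absurd h hu'
          · exact h
        exact Or.inr ((List.singleton_sublist.mpr hu'').cons₂ _)
      · have hu'' : u ∈ tl := by
          rcases List.mem_cons.mp hu with h | h
          · exact absurd h hu'
          · exact h
        have hv'' : v ∈ tl := by
          rcases List.mem_cons.mp hv with h | h
          · exact absurd h hv'
          · exact h
        exact (ih hu'' hv'').imp (·.cons hd) (·.cons hd)

theorem rep2_iff_probe (l : List Int) (t : Int) :
    Rep2 l t ↔ ∃ x, x ∈ l ∧ (t - x) ∈ l ∧ (¬ 2 * x = t ∨ 2 ≤ l.count x) := by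
  constructor
  · rintro ⟨u, v, hs, huv⟩
    have hu : u ∈ l := hs.subset (by simp)
    have hv : v ∈ l := hs.subset (by simp)
    refine ⟨u, hu, by rwa [show t - u = v by omega], ?_⟩
    by_cases h2 : 2 * u = t
    · right
      have huv' : v = u := by omega
      subst huv'
      have h2c : ([v, v] : List Int).count v = 2 := by simp
      have hle := hs.count_le v
      omega
    · exact Or.inl h2
  · rintro ⟨x, hx, hx', hor⟩
    by_cases h2 : 2 * x = t
    · have hcnt : 2 ≤ l.count x := by
        rcases hor with h | h
        · exact absurd h2 h
        · exact h
      have hs : [x, x].Sublist l := by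
        have h := List.replicate_sublist_iff.mpr hcnt
        simpa [List.replicate] using h
      exact ⟨x, x, hs, by omega⟩
    · have hne : x ≠ t - x := by omega
      rcases pair_sublist_or_swap hx hx' hne with h | h
      · exact ⟨x, t - x, h, by omega⟩
      · exact ⟨t - x, x, h, by omega⟩

theorem rep2_perm {l l' : List Int} (h : l.Perm l') (t : Int) : (Rep2 l t ↔ Rep2 l' t) := by
  rw [rep2_iff_probe, rep2_iff_probe]
  constructor <;> rintro ⟨x, h1, h2, h3⟩
  · exact ⟨x, h.mem_iff.mp h1, h.mem_iff.mp h2, by rwa [h.count_eq] at h3⟩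
  · exact ⟨x, h.mem_iff.mpr h1, h.mem_iff.mpr h2, by rwa [← h.count_eq] at h3⟩

theorem mem_pairSumsA (a : List Int) (t : Int) : t ∈ pairSumsA a ↔ Rep2 a t := by
  unfold pairSumsA
  have h1 : ∀ (acc : List Int) (i : Int),
      (PySem.List.pyRange i (PySem.List.len a) 1).foldl
        (fun acc j => if i ≠ j then acc ++ [PySem.List.pyGetD a i 0 + PySem.List.pyGetD a j 0] else acc) acc
      = acc ++ ((PySem.List.pyRange i (PySem.List.len a) 1).filter
          (fun j => decide (i ≠ j))).map (fun j => PySem.List.pyGetD a i 0 + PySem.List.pyGetD a j 0) :=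
    fun acc i => PySem.List.foldl_append_ite _ _ _ _
  simp only [h1]
  rw [PySem.List.foldl_append_eq_flatMap]
  simp only [List.nil_append, List.mem_flatMap, List.mem_map, List.mem_filter,
    PySem.List.mem_pyRange_one, PySem.List.len_eq, decide_eq_true_eq]
  constructor
  · rintro ⟨i, ⟨h0, hin⟩, j, ⟨⟨hij, hjn⟩, hne⟩, ht⟩
    have hij' : i < j := lt_of_le_of_ne hij hne
    have h0j : 0 ≤ j := le_trans h0 hij
    have hpi : i.toNat < a.length := by omega
    have hpj : j.toNat < a.length := by omega
    refine ⟨a.getD i.toNat 0, a.getD j.toNat 0,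
      pair_sublist_of_indices a i.toNat j.toNat (by omega) hpj, ?_⟩
    have hi' : i = ((i.toNat : Nat) : Int) := by omega
    have hj' : j = ((j.toNat : Nat) : Int) := by omega
    rw [hi', hj', PySem.List.pyGetD_natCast, PySem.List.pyGetD_natCast] at ht
    exact ht
  · rintro ⟨u, v, hs, huv⟩
    obtain ⟨p, q, hpq, hq, hu, hv⟩ := indices_of_pair_sublist hs
    refine ⟨(p : Int), ⟨by omega, by exact_mod_cast (by omega : p < a.length)⟩,
      (q : Int), ⟨⟨by exact_mod_cast hpq.le, by exact_mod_cast hq⟩, by exact_mod_cast hpq.ne⟩, ?_⟩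
    rw [PySem.List.pyGetD_natCast, PySem.List.pyGetD_natCast, hu, hv]
    exact huv

theorem scan_eq (b : List Int) (cnt : PySem.Dict Int Int)
    (hiff : ∀ j : Int, j ∈ b ↔ (cnt.contains j = true ∨ probeB cnt j = true)) :
    ∀ (stop i : Int), scanA b stop i = scanB cnt stop i := by
  have H : ∀ (n : Nat) (i : Int), scanAGo b n i = scanBGo cnt n i := by
    intro n
    induction n with
    | zero => intro i; rfl
    | succ n ih =>
      intro i
      rw [scanAGo, scanBGo]
      by_cases hc : cnt.contains i = true
      · rw [if_neg (not_not_intro ((hiff i).mpr (Or.inl hc))), if_pos hc]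
        exact ih (i + 1)
      · rw [if_neg hc]
        by_cases hp : probeB cnt i = true
        · rw [if_neg (not_not_intro ((hiff i).mpr (Or.inr hp))), if_pos hp]
          exact ih (i + 1)
        · have hib : ¬ i ∈ b := fun hb => by
            rcases (hiff i).mp hb with h' | h'
            · exact hc h'
            · exact hp h'
          rw [if_pos hib, if_neg hp]
  intro stop i
  rw [scanA, scanB, H]

theorem least_non_represented_eq_alt (a : List Int) (ha : a ≠ []) :
    least_non_represented a = least_non_represented_alt a := by
  have hcnt : a.foldl (fun d x => d.insert x (d.getD x 0 + 1)) PySem.Dict.empty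
      = PySem.Dict.counter a := PySem.Dict.foldl_insert_getD_add_one_eq_counter a
  set s : List Int := PySem.List.sorted a (fun x => x) false with hs_def
  set b : List Int := PySem.List.sorted (PySem.Set.ofList (pairSumsA a ++ a)) (fun x => x) false with hb_def
  have hsp : s.Perm a := PySem.List.sorted_perm a _ false
  have hbp : b.Perm (PySem.Set.ofList (pairSumsA a ++ a)) := PySem.List.sorted_perm _ _ false
  have hmemb : ∀ x : Int, x ∈ b ↔ (Rep2 a x ∨ x ∈ a) := by
    intro x
    rw [hbp.mem_iff, PySem.Set.mem_ofList, List.mem_append, mem_pairSumsA]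
  have hslen : s.length = a.length := hsp.length_eq
  have hsne : s ≠ [] := by
    intro h
    rw [h] at hslen
    simp at hslen
    exact ha (List.length_eq_zero_iff.mp hslen.symm)
  obtain ⟨x0, hx0⟩ : ∃ x, x ∈ a := List.exists_mem_of_ne_nil a ha
  have hbne : b ≠ [] := List.ne_nil_of_mem ((hmemb x0).mpr (Or.inr hx0))
  -- monotonicity of the two sorted lists
  have hsmono : ∀ (p q : Nat) (hpq : p ≤ q) (hq : q < s.length),
      s[p]'(lt_of_le_of_lt hpq hq) ≤ s[q]'hq := by
    intro p q hpq hq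
    exact PySem.List.sorted_id_getElem_mono a hpq hq
  have hbmono : ∀ (p q : Nat) (hpq : p ≤ q) (hq : q < b.length),
      b[p]'(lt_of_le_of_lt hpq hq) ≤ b[q]'hq := by
    intro p q hpq hq
    exact PySem.List.sorted_id_getElem_mono (PySem.Set.ofList (pairSumsA a ++ a)) hpq hq
  have hble : ∀ y ∈ b, y ≤ b.getLast hbne := by
    intro y hy
    obtain ⟨k, hk, hky⟩ := List.mem_iff_getElem.mp hy
    rw [List.getLast_eq_getElem, ← hky]
    exact hbmono k (b.length - 1) (by omega) (by omega)
  have hAget : PySem.List.pyGet? b (-1) = some (b.getLast hbne) := by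
    rw [PySem.List.pyGet?_neg_one, List.getLast?_eq_getLast_of_ne_nil hbne]
  have hBget : PySem.List.pyGet? s (-1) = some (s.getLast hsne) := by
    rw [PySem.List.pyGet?_neg_one, List.getLast?_eq_getLast_of_ne_nil hsne]
  -- the two scan bounds coincide
  have hM : b.getLast hbne =
      (if PySem.List.len s = 1 then s.getLast hsne
       else max (s.getLast hsne) (s.getLast hsne + PySem.List.pyGetD s (-2) 0)) := by
    by_cases hn1 : a.length = 1
    · obtain ⟨x, hax⟩ := List.length_eq_one_iff.mp hn1
      subst hax
      have hnodup : b.Nodup := hbp.nodup_iff.mpr (PySem.Set.nodup_ofList _)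
      have hmem1 : ∀ t ∈ b, t = x := by
        intro t ht
        rcases (hmemb t).mp ht with hrep | hmema
        · exfalso
          obtain ⟨u, v, hsub, _⟩ := hrep
          have := hsub.length_le
          simp at this
        · simpa using hmema
      have hb1 : b = [x] := by
        cases hb : b with
        | nil => exact absurd hb hbne
        | cons hd tl =>
          have hhd : hd = x := hmem1 hd (by rw [hb]; simp)
          cases htl : tl with
          | nil => rw [hhd]
          | cons y tys =>
            exfalso
            have hy : y = x := hmem1 y (by rw [hb, htl]; simp)
            have hnd := hnodup
            rw [hb, htl, hhd, hy] at hnd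
            simp [List.nodup_cons] at hnd
      have hs1 : s = [x] := List.perm_singleton.mp hsp
      rw [if_pos (by simp [hs1, PySem.List.len_eq])]
      simp [hb1, hs1]
    · have hn2 : 2 ≤ a.length := by
        have : a.length ≠ 0 := by simpa [List.length_eq_zero_iff] using ha
        omega
      rw [if_neg (by rw [PySem.List.len_eq, hslen]; exact_mod_cast hn1)]
      have hS2 : PySem.List.pyGetD s (-2) 0 = s[s.length - 2]'(by omega) :=
        PySem.List.pyGetD_neg_ofNat s 2 0 (by omega) (by omega)
      have hTop : s.getLast hsne = s[s.length - 1]'(by omega) := List.getLast_eq_getElem hsne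
      apply le_antisymm
      · rcases (hmemb _).mp (List.getLast_mem hbne) with hrep | hmema
        · have hrep' : Rep2 s (b.getLast hbne) := (rep2_perm hsp _).mpr hrep
          obtain ⟨u, v, hsub, huv⟩ := hrep'
          obtain ⟨p, q, hpq, hq, hu, hv⟩ := indices_of_pair_sublist hsub
          have hup : u = s[p]'(by omega) := by rw [← hu, List.getD_eq_getElem _ _ (by omega)]
          have hvq : v = s[q]'hq := by rw [← hv, List.getD_eq_getElem _ _ hq]
          have h1 : u ≤ s[s.length - 2]'(by omega) := by
            rw [hup]; exact hsmono p (s.length - 2) (by omega) (by omega)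
          have h2 : v ≤ s[s.length - 1]'(by omega) := by
            rw [hvq]; exact hsmono q (s.length - 1) (by omega) (by omega)
          rw [hS2, hTop]
          refine le_trans ?_ (le_max_right _ _)
          omega
        · have hma : b.getLast hbne ∈ s := hsp.mem_iff.mpr hmema
          obtain ⟨k, hk, hky⟩ := List.mem_iff_getElem.mp hma
          refine le_trans ?_ (le_max_left _ _)
          rw [hTop, ← hky]
          exact hsmono k (s.length - 1) (by omega) (by omega)
      · apply max_le
        · apply hble
          refine (hmemb _).mpr (Or.inr ?_)
          exact hsp.mem_iff.mp (List.getLast_mem hsne)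
        · apply hble
          refine (hmemb _).mpr (Or.inl ?_)
          refine (rep2_perm hsp _).mp ?_
          refine ⟨s.getD (s.length - 2) 0, s.getD (s.length - 1) 0,
            pair_sublist_of_indices s (s.length - 2) (s.length - 1) (by omega) (by omega), ?_⟩
          rw [List.getD_eq_getElem _ _ (by omega : s.length - 2 < s.length),
            List.getD_eq_getElem _ _ (by omega : s.length - 1 < s.length), hS2, hTop]
          omega
  -- the per-candidate tests coincide
  have hcontAll : ∀ y : Int, ((PySem.Dict.counter a).contains y = true) ↔ y ∈ a := by
    intro y
    rw [PySem.Dict.contains_iff_mem_keys, PySem.Dict.keys_counter, PySem.Set.mem_ofList]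
  have hany : ∀ i : Int, (probeB (PySem.Dict.counter a) i = true) ↔ Rep2 a i := by
    intro i
    rw [rep2_iff_probe, probeB, List.any_eq_true]
    constructor
    · rintro ⟨x, hxk, hgx⟩
      have hxa : x ∈ a := by
        rwa [PySem.Dict.keys_counter, PySem.Set.mem_ofList] at hxk
      simp only [Bool.and_eq_true, Bool.or_eq_true, decide_eq_true_eq] at hgx
      obtain ⟨hc1, hc2⟩ := hgx
      refine ⟨x, hxa, (hcontAll _).mp hc1, ?_⟩
      rcases hc2 with h | h
      · exact Or.inl h
      · right
        rw [PySem.Dict.getD_counter] at h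
        exact_mod_cast h
    · rintro ⟨x, hxa, hxc, hor⟩
      refine ⟨x, by rw [PySem.Dict.keys_counter, PySem.Set.mem_ofList]; exact hxa, ?_⟩
      simp only [Bool.and_eq_true, Bool.or_eq_true, decide_eq_true_eq]
      refine ⟨(hcontAll _).mpr hxc, ?_⟩
      rcases hor with h | h
      · exact Or.inl h
      · right
        rw [PySem.Dict.getD_counter]
        exact_mod_cast h
  have hiff : ∀ j : Int, j ∈ b ↔
      ((PySem.Dict.counter a).contains j = true ∨ probeB (PySem.Dict.counter a) j = true) := by
    intro j
    rw [hmemb j, hany j, hcontAll j]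
    exact Or.comm
  -- assemble
  unfold least_non_represented least_non_represented_alt
  simp only [← hs_def, ← hb_def, hcnt, hAget, hBget, hM]
  exact scan_eq b (PySem.Dict.counter a) hiff _ 1

-- ===== VERDICT (by name: the statement is the Claim_ definition above) =====
theorem least_non_represented_spec : Claim_equal_least_non_represented := by
  intro a _ hpre
  exact least_non_represented_eq_alt a hpre
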